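-- pv_equiv track=rewrite | github.com/TerryZYH/PokerRangeCalculator | backend/app/routes/range.py | calculate_total_combinations
-- ===== SOURCE A (Python) =====
-- def calculate_total_combinations(hands: list[str]) -> int:
--     """
--     计算手牌总组合数
--
--     Args:
--         hands: 手牌列表
--
--     Returns:
--         总组合数
--     """
--     total = 0
--     for hand in hands:
--         if len(hand) == 2:  # 对子，如 AA
--             total += 6
--         elif hand.endswith('s'):  # 同色，如 AKs
--             total += 4
--         elif hand.endswith('o'):  # 不同色，如 AKo
--             total += 12
--     return total
-- ===== SOURCE B (Python) =====
-- def calculate_total_combinations(hands: list[str]) -> int: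
--     pairs = sum(1 for h in hands if len(h) == 2)
--     suited = sum(1 for h in hands if len(h) != 2 and h.endswith('s'))
--     offsuit = sum(1 for h in hands if len(h) != 2 and not h.endswith('s') and h.endswith('o'))
--     return 6 * pairs + 4 * suited + 12 * offsuit
-- ===== Notes on version B (the rewrite author's own statement) =====
-- stated objective: simpler
-- what changed: Replaces A's single interleaved accumulator loop with three separate filtered counts (pairs, suited, offsuit) combined by the closed form 6*pairs + 4*suited + 12*offsuit.
import Mathlib
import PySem

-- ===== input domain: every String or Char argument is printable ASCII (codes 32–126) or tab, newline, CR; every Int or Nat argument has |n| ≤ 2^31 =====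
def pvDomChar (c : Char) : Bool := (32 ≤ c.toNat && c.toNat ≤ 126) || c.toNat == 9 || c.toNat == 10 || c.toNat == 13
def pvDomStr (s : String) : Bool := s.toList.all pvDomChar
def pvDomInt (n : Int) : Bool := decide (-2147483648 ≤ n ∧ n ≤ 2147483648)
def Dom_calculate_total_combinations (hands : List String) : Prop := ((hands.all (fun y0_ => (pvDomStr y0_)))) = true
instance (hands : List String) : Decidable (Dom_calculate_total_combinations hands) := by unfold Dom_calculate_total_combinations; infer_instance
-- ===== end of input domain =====

-- ===== PORT A =====
def calculate_total_combinations (hands : List String) : Int :=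
  hands.foldl (fun total hand =>
    if PySem.Str.len hand == 2 then total + 6
    else if PySem.Str.endswith hand "s" then total + 4
    else if PySem.Str.endswith hand "o" then total + 12
    else total) 0

-- ===== PORT B =====
-- B: three filtered counts, then the closed form 6*pairs + 4*suited + 12*offsuit (simpler decomposition)
def calculate_total_combinations_alt (hands : List String) : Int :=
  let pairs : Int := (hands.countP (fun h => PySem.Str.len h == 2) : Int)
  let suited : Int := (hands.countP (fun h => PySem.Str.len h != 2 && PySem.Str.endswith h "s") : Int)
  let offsuit : Int := (hands.countP (fun h => PySem.Str.len h != 2 && !PySem.Str.endswith h "s" && PySem.Str.endswith h "o") : Int)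
  6 * pairs + 4 * suited + 12 * offsuit

-- ===== PRECONDITION & SPEC =====
def Spec_calculate_total_combinations (hands : List String) (out : Int) : Prop := out = calculate_total_combinations_alt hands
instance (hands : List String) (out : Int) : Decidable (Spec_calculate_total_combinations hands out) := by unfold Spec_calculate_total_combinations; infer_instance

-- ===== CLAIM (what is proved, stated in full; the proofs are below) =====
def Claim_equal_calculate_total_combinations : Prop := ∀ (hands : List String), Dom_calculate_total_combinations hands → Spec_calculate_total_combinations hands (calculate_total_combinations hands)

-- ===== LEMMAS AND PROOFS =====

-- ===== VERDICT (by name: the statement is the Claim_ definition above) =====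
theorem pv_key (l : List String) (a : Int) :
    l.foldl (fun total hand =>
      if PySem.Str.len hand == 2 then total + 6
      else if PySem.Str.endswith hand "s" then total + 4
      else if PySem.Str.endswith hand "o" then total + 12
      else total) a = a + calculate_total_combinations_alt l := by
  induction l generalizing a with
  | nil => simp [calculate_total_combinations_alt]
  | cons h t ih =>
    simp only [List.foldl_cons, ih, calculate_total_combinations_alt, List.countP_cons]
    by_cases h2 : (PySem.Str.len h == 2) = true <;>
      by_cases hs : (PySem.Str.endswith h "s") = true <;>
        by_cases ho : (PySem.Str.endswith h "o") = true <;>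
        simp_all <;> ring

theorem calculate_total_combinations_spec : Claim_equal_calculate_total_combinations := by
  intro hands _
  unfold Spec_calculate_total_combinations calculate_total_combinations
  rw [pv_key]
  ring
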